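-- pv_equiv track=rewrite | github.com/fabsi299/PL2025-A100902 | TPC2/compositores.py | obras_por_periodo
-- ===== SOURCE A (Python) =====
-- def obras_por_periodo(dados):
--     distribucao = {}
--
--     for obra in dados:
--         periodo = obra.get('periodo')
--         nome = obra.get('nome')
--
--         if periodo and nome:
--             if periodo not in distribucao:
--                 distribucao[periodo] = []
--             distribucao[periodo].append(nome)
--
--     for periodo in distribucao:
--         distribucao[periodo].sort()
--
--     return distribucao
-- ===== SOURCE B (Python) =====
-- def obras_por_periodo(dados):
--     pares = [(obra.get('periodo'), obra.get('nome')) for obra in dados]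
--     pares = [(p, n) for p, n in pares if p and n]
--     distribucao = {}
--     for p, _ in pares:
--         distribucao.setdefault(p, [])
--     for p, n in sorted(pares, key=lambda x: x[1]):
--         distribucao[p].append(n)
--     return distribucao
-- ===== Notes on version B (the rewrite author's own statement) =====
-- stated objective: alternative
-- what changed: Instead of appending names per period and then sorting each period's list in place, B collects the valid (periodo, nome) pairs, pre-registers the keys in first-appearance order, and does one global stable sort by name followed by a single distribution pass, so no per-group sort remains.
import Mathlib
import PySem

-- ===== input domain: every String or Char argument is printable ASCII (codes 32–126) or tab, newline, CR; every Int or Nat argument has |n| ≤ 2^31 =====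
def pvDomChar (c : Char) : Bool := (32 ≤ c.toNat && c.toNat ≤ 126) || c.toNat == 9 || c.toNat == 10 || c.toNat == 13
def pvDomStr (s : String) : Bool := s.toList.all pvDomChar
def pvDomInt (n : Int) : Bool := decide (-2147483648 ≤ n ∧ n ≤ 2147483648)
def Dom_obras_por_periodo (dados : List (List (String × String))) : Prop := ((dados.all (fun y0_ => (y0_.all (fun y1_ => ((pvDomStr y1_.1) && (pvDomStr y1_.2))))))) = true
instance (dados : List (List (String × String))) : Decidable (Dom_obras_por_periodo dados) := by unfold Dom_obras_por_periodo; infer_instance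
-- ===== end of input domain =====

-- B groups by one global stable sort of (periodo, nome) pairs by name instead of A's per-period sort calls; same return value.

-- ===== PORT A =====
-- A-side helper: Python's obra.get(k) on an association list (first match)
def pvDictGetA (o : List (String × String)) (k : String) : Option String :=
  (o.find? (fun p => p.1 == k)).map (fun p => p.2)

def obras_por_periodo (dados : List (List (String × String))) : List (String × List String) :=
  let d := dados.foldl (fun d obra =>
    let p? := pvDictGetA obra "periodo"
    let n? := pvDictGetA obra "nome"
    match p?, n? with
    | some p, some n =>
      if p ≠ "" ∧ n ≠ "" then
        let d1 := if d.contains p then d else d.insert p ([] : List String)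
        d1.modify p [] (fun v => v ++ [n])
      else d
    | _, _ => d) PySem.Dict.empty
  d.items.map (fun kv => (kv.1, PySem.List.sorted kv.2 (fun x => x) false))

-- ===== PORT B =====
-- B-side helpers: obra.get(k) again (first match), and the filtered (periodo, nome) pair list
def pvDictGetB (o : List (String × String)) (k : String) : Option String :=
  (o.find? (fun p => p.1 == k)).map (fun p => p.2)

def pvPick (pn : Option String × Option String) : Option (String × String) :=
  pn.1.bind (fun p => pn.2.bind (fun n => if p ≠ "" ∧ n ≠ "" then some (p, n) else none))

def pvPares (dados : List (List (String × String))) : List (String × String) :=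
  (dados.map (fun obra => (pvDictGetB obra "periodo", pvDictGetB obra "nome"))).filterMap pvPick

def obras_por_periodo_alt (dados : List (List (String × String))) : List (String × List String) :=
  let pares := pvPares dados
  let d0 := pares.foldl (fun d pn => d.setdefault pn.1 ([] : List String)) PySem.Dict.empty
  let d := (PySem.List.sorted pares (fun x => x.2) false).foldl
              (fun d pn => d.modify pn.1 [] (fun v => v ++ [pn.2])) d0
  d.items

-- ===== PRECONDITION & SPEC =====
def Spec_obras_por_periodo (dados : List (List (String × String))) (out : List (String × List String)) : Prop := out = obras_por_periodo_alt dados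
instance (dados : List (List (String × String))) (out : List (String × List String)) : Decidable (Spec_obras_por_periodo dados out) := by unfold Spec_obras_por_periodo; infer_instance

-- ===== CLAIM (what is proved, stated in full; the proofs are below) =====
def Claim_equal_obras_por_periodo : Prop := ∀ (dados : List (List (String × String))), Dom_obras_por_periodo dados → Spec_obras_por_periodo dados (obras_por_periodo dados)

-- ===== LEMMAS AND PROOFS =====

-- A's "if absent insert []" then append collapses to a bare modify
lemma pv_insert_modify_collapse (d : PySem.Dict String (List String)) (p : String) (n : String) :
    (if d.contains p then d else d.insert p ([] : List String)).modify p [] (fun v => v ++ [n])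
      = d.modify p [] (fun v => v ++ [n]) := by
  by_cases h : d.contains p
  · simp [h]
  · simp only [h, if_neg, Bool.not_eq_true]
    show (d.insert p []).insert p (((d.insert p []).getD p []) ++ [n])
           = d.insert p ((d.getD p []) ++ [n])
    rw [PySem.Dict.getD_insert_self, PySem.Dict.insert_insert_self,
        PySem.Dict.getD_of_not_contains d [] (by simpa using h)]

-- A's first loop is the modify-fold over the filtered pair list
lemma pv_foldA_eq (dados : List (List (String × String))) :
    ∀ d : PySem.Dict String (List String),
    dados.foldl (fun d obra =>
      let p? := pvDictGetA obra "periodo"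
      let n? := pvDictGetA obra "nome"
      match p?, n? with
      | some p, some n =>
        if p ≠ "" ∧ n ≠ "" then
          let d1 := if d.contains p then d else d.insert p ([] : List String)
          d1.modify p [] (fun v => v ++ [n])
        else d
      | _, _ => d) d
    = (pvPares dados).foldl (fun d pn => d.modify pn.1 [] (fun v => v ++ [pn.2])) d := by
  induction dados with
  | nil => intro d; simp [pvPares]
  | cons o rest ih =>
    intro d
    simp only [List.foldl_cons, pvPares, List.map_cons, List.filterMap_cons]
    rw [show pvDictGetB o "periodo" = pvDictGetA o "periodo" from rfl,
        show pvDictGetB o "nome" = pvDictGetA o "nome" from rfl]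
    rcases hp : pvDictGetA o "periodo" with _ | p <;> rcases hn : pvDictGetA o "nome" with _ | n <;>
      simp only [pvPick, Option.bind_none, Option.bind_some]
    · exact ih d
    · exact ih d
    · exact ih d
    · by_cases hc : p ≠ "" ∧ n ≠ ""
      · simp only [if_pos hc, List.foldl_cons]
        rw [pv_insert_modify_collapse]
        exact ih _
      · simp only [if_neg hc]
        exact ih d

-- the setdefault pre-pass: every value is []
lemma pv_getD_setdefault_fold (l : List (String × String)) :
    ∀ d : PySem.Dict String (List String), (∀ k, d.getD k [] = []) →
    ∀ k, (l.foldl (fun d pn => d.setdefault pn.1 ([] : List String)) d).getD k [] = [] := by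
  induction l with
  | nil => intro d h k; simpa using h k
  | cons pn rest ih =>
    intro d h k
    simp only [List.foldl_cons]
    refine ih _ (fun k' => ?_) k
    by_cases hk : k' = pn.1
    · subst hk; rw [PySem.Dict.getD_setdefault_self]; exact h _
    · rw [PySem.Dict.getD_eq_get?_getD, PySem.Dict.get?_setdefault_of_ne _ _ hk,
          ← PySem.Dict.getD_eq_get?_getD]
      exact h _

-- the setdefault pre-pass: keys = Set.update of the first components
lemma pv_keys_setdefault_fold (l : List (String × String)) :
    ∀ d : PySem.Dict String (List String),
    (l.foldl (fun d pn => d.setdefault pn.1 ([] : List String)) d).keys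
      = PySem.Set.update d.keys (l.map (fun pn => pn.1)) := by
  induction l with
  | nil => intro d; simp [PySem.Set.update]
  | cons pn rest ih =>
    intro d
    simp only [List.foldl_cons, List.map_cons, PySem.Set.update_cons]
    rw [ih]
    congr 1
    rw [PySem.Dict.keys_setdefault]
    by_cases h : d.contains pn.1
    · have hmem : pn.1 ∈ d.keys := (PySem.Dict.contains_iff_mem_keys d pn.1).mp h
      rw [if_pos h, PySem.Set.add_of_mem hmem]
    · have hmem : pn.1 ∉ d.keys := fun hm =>
        h ((PySem.Dict.contains_iff_mem_keys d pn.1).mpr hm)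
      rw [if_neg h, PySem.Set.add_of_not_mem hmem]

-- Set.update by elements already present is the identity
lemma pv_update_of_subset (s : PySem.Set String) (xs : List String)
    (h : ∀ x ∈ xs, x ∈ s) : PySem.Set.update s xs = s := by
  rw [PySem.Set.update_eq_append_filter]
  have hnil : (PySem.Set.ofList xs).filter (fun y => !PySem.Set.contains s y) = [] := by
    rw [List.filter_eq_nil_iff]
    intro y hy
    have hys : y ∈ s := h y ((PySem.Set.mem_ofList xs y).mp hy)
    simp [hys]
  rw [hnil, List.append_nil]

-- keys/nodup of the modify-fold, instantiated to our loop body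
lemma pv_keys_modify_fold (l : List (String × String)) (d : PySem.Dict String (List String)) :
    (l.foldl (fun d pn => d.modify pn.1 [] (fun v => v ++ [pn.2])) d).keys
      = PySem.Set.update d.keys (l.map (fun pn => pn.1)) :=
  PySem.Dict.keys_foldl_modify_key l (fun pn => pn.1) [] (fun _ pn v => v ++ [pn.2]) d

lemma pv_keys_empty : (PySem.Dict.empty : PySem.Dict String (List String)).keys = [] := rfl

lemma pv_getD_empty (k : String) :
    (PySem.Dict.empty : PySem.Dict String (List String)).getD k [] = [] := rfl

-- per key: sorting A's group equals B's filtered slice of the globally sorted pairs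
lemma pv_group_sorted (l : List (String × String)) (k : String) :
    PySem.List.sorted ((l.filter (fun p => p.1 == k)).map (fun p => p.2)) (fun x => x) false
      = ((PySem.List.sorted l (fun x => x.2) false).filter (fun p => p.1 == k)).map (fun p => p.2) := by
  apply PySem.List.sorted_id_eq_of_perm_of_pairwise
  · exact ((PySem.List.sorted_perm l (fun x => x.2) false).filter _).map _
  · have h1 : List.Pairwise (fun a b => a.2 ≤ b.2) (PySem.List.sorted l (fun x => x.2) false) :=
      PySem.List.sorted_pairwise l (fun x => x.2)
    exact (List.pairwise_map.mpr (h1.filter _))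

-- ===== VERDICT (by name: the statement is the Claim_ definition above) =====
theorem obras_por_periodo_spec : Claim_equal_obras_por_periodo := by
  intro dados _
  unfold Spec_obras_por_periodo
  dsimp only [obras_por_periodo, obras_por_periodo_alt]
  rw [pv_foldA_eq dados PySem.Dict.empty]
  set pares := pvPares dados with hpares
  set dA := pares.foldl (fun d pn => d.modify pn.1 [] (fun v => v ++ [pn.2])) PySem.Dict.empty with hdA
  set d0 := pares.foldl (fun d pn => d.setdefault pn.1 ([] : List String)) PySem.Dict.empty with hd0
  set dB := (PySem.List.sorted pares (fun x => x.2) false).foldl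
      (fun d pn => d.modify pn.1 [] (fun v => v ++ [pn.2])) d0 with hdB
  -- key lists
  have hkA : dA.keys = PySem.Set.ofList (pares.map (fun pn => pn.1)) := by
    rw [hdA, pv_keys_modify_fold, pv_keys_empty, PySem.Set.update_nil_left]
  have hk0 : d0.keys = PySem.Set.ofList (pares.map (fun pn => pn.1)) := by
    rw [hd0, pv_keys_setdefault_fold, pv_keys_empty, PySem.Set.update_nil_left]
  have hkB : dB.keys = d0.keys := by
    rw [hdB, pv_keys_modify_fold]
    apply pv_update_of_subset
    intro x hx
    rw [hk0, PySem.Set.mem_ofList]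
    rcases List.mem_map.mp hx with ⟨pn, hpn, rfl⟩
    exact List.mem_map.mpr ⟨pn, (PySem.List.sorted_perm pares (fun x => x.2) false).mem_iff.mp hpn, rfl⟩
  have hnodA : dA.keys.Nodup := by rw [hkA]; exact PySem.Set.nodup_ofList _
  have hnodB : dB.keys.Nodup := by rw [hkB, hk0]; exact PySem.Set.nodup_ofList _
  -- values
  have hvA : ∀ k, dA.getD k [] = (pares.filter (fun p => p.1 == k)).map (fun p => p.2) := by
    intro k
    rw [hdA, PySem.Dict.getD_foldl_modify_append, pv_getD_empty, List.nil_append]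
  have hv0 : ∀ k, d0.getD k [] = [] := by
    intro k
    rw [hd0]
    exact pv_getD_setdefault_fold pares PySem.Dict.empty (fun k => pv_getD_empty k) k
  have hvB : ∀ k, dB.getD k [] =
      ((PySem.List.sorted pares (fun x => x.2) false).filter (fun p => p.1 == k)).map (fun p => p.2) := by
    intro k
    rw [hdB, PySem.Dict.getD_foldl_modify_append, hv0, List.nil_append]
  -- items
  rw [PySem.Dict.items_eq_map_keys dA hnodA [], PySem.Dict.items_eq_map_keys dB hnodB [],
      List.map_map, hkB, hk0, hkA]
  apply List.map_congr_left
  intro k _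
  simp only [Function.comp]
  rw [hvA, hvB, pv_group_sorted]
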